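-- pv_equiv track=rewrite | github.com/Kilobato04/smability-aire-gpt-model | app/airegpt_telegram/cards.py | get_summary_buttons
-- ===== SOURCE A (Python) =====
-- def get_summary_buttons(locations_dict, is_premium=False):
--     """
--     Genera botones de consulta para TODAS las ubicaciones guardadas.
--     Argumentos:
--       - locations_dict: El diccionario 'locations' directo de DynamoDB.
--       - is_premium: Booleano para mostrar/ocultar botón de pago.
--     """
--     keyboard = []
--
--     # 1. Fila de Consultas (Dinámica)
--     # Creamos botones para CADA ubicación en el diccionario
--     row_locs = []
--     for key, val in locations_dict.items():
--         # Nombre bonito para el botón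
--         label = val.get('display_name', key.capitalize())
--         # Llave segura para el callback (ej. "CHECK_AIR_casa")
--         safe_key = str(key).replace(" ", "_")
--
--         row_locs.append({"text": f"💨 {label}", "callback_data": f"CHECK_AIR_{safe_key}"})
--
--     # Si son muchas, las dividimos en filas de 2 para que no se vea feo
--     # (Chunking list into size 2)
--     for i in range(0, len(row_locs), 2):
--         keyboard.append(row_locs[i:i+2])
--
--     # 2. Fila de Upselling / Menú Avanzado
--     if not is_premium:
--         # Aquí mutamos el botón viejo al nuevo "Go Premium"
--         keyboard.append([{"text": "💎 Go Premium", "callback_data": "GO_PREMIUM"}])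
--     else:
--         # Y si YA ES premium, le mostramos su portal avanzado
--         keyboard.append([{"text": "⚙️ Configuración Avanzada", "callback_data": "CONFIG_ADVANCED"}])
--
--     return {"inline_keyboard": keyboard}
-- ===== SOURCE B (Python) =====
-- def get_summary_buttons(locations_dict, is_premium=False):
--     """Same keyboard, built in one pass: each button is placed straight into the
--     row being formed (a pending half-row), so there is no intermediate flat
--     button list and no second range/slice chunking pass."""
--     keyboard = []
--     pending = None
--     for key, val in locations_dict.items():
--         label = val.get('display_name', key.capitalize())
--         safe_key = str(key).replace(" ", "_")
--         btn = {"text": f"💨 {label}", "callback_data": f"CHECK_AIR_{safe_key}"}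
--         if pending is None:
--             pending = [btn]
--         else:
--             pending.append(btn)
--             keyboard.append(pending)
--             pending = None
--     if pending is not None:
--         keyboard.append(pending)
--     if not is_premium:
--         keyboard.append([{"text": "💎 Go Premium", "callback_data": "GO_PREMIUM"}])
--     else:
--         keyboard.append([{"text": "⚙️ Configuración Avanzada", "callback_data": "CONFIG_ADVANCED"}])
--     return {"inline_keyboard": keyboard}
-- ===== Notes on version B (the rewrite author's own statement) =====
-- stated objective: simpler
-- what changed: Replaces A's two passes (build a flat button list, then chunk it into rows of 2 with a range/slice loop) by a single pass that places each button straight into the row being formed (pending half-row), appending each completed row as it goes.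
import Mathlib
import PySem

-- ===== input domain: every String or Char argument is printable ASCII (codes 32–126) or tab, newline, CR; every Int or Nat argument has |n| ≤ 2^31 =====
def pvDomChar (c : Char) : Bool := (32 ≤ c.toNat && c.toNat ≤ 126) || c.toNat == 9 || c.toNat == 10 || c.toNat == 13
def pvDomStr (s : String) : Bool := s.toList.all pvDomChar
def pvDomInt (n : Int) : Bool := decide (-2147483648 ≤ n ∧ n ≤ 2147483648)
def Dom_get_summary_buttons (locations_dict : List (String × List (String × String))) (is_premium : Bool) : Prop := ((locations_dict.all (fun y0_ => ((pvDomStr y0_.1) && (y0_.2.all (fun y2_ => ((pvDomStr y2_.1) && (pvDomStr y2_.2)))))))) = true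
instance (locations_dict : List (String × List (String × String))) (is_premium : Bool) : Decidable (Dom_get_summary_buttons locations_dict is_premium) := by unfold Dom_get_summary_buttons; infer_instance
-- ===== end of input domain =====

-- B builds the row-chunked keyboard by direct recursion over the items (two at a time) instead of
-- A's flat button list followed by a range/slice chunking pass; same return value everywhere.

-- shared helpers (both Pythons compute the very same button dict per item and the same trailing row)
-- str.capitalize(): first char uppercased, the rest lowered (exact on the ASCII domain)
def pvCapitalize (s : String) : String :=
  match s.toList with
  | [] => ""
  | c :: rest => String.ofList (PySem.Chars.upperChar c :: PySem.Chars.lower rest)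

def pvButton (key : String) (val : List (String × String)) : List (String × String) :=
  [("text", "💨 " ++ PySem.Dict.getD (PySem.Dict.mk val) "display_name" (pvCapitalize key)),
   ("callback_data", "CHECK_AIR_" ++ PySem.Str.replace key " " "_")]

def pvPremiumRow (is_premium : Bool) : List (List (List (String × String))) :=
  if !is_premium then [[[("text", "💎 Go Premium"), ("callback_data", "GO_PREMIUM")]]]
  else [[[("text", "⚙️ Configuración Avanzada"), ("callback_data", "CONFIG_ADVANCED")]]]

-- ===== PORT A =====
def get_summary_buttons (locations_dict : List (String × List (String × String))) (is_premium : Bool) : List (String × List (List (List (String × String)))) :=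
  let row_locs : List (List (String × String)) :=
    locations_dict.foldl (fun acc kv => acc ++ [pvButton kv.1 kv.2]) []
  let keyboard : List (List (List (String × String))) :=
    (PySem.List.pyRange 0 (PySem.List.len row_locs) 2).foldl
      (fun kb i => kb ++ [PySem.List.slice row_locs (some i) (some (i + 2))]) []
  let keyboard := keyboard ++ pvPremiumRow is_premium
  [("inline_keyboard", keyboard)]

-- ===== PORT B =====
-- one pass: 'pending' holds the half-finished row, pvFlush is the post-loop flush of it
def pvStep (st : List (List (List (String × String))) × Option (List (String × String)))
    (kv : String × List (String × String)) :
    List (List (List (String × String))) × Option (List (String × String)) :=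
  let btn := pvButton kv.1 kv.2
  match st.2 with
  | none => (st.1, some btn)
  | some p => (st.1 ++ [[p, btn]], none)

def pvFlush (st : List (List (List (String × String))) × Option (List (String × String))) :
    List (List (List (String × String))) :=
  match st.2 with
  | none => st.1
  | some p => st.1 ++ [[p]]

def get_summary_buttons_alt (locations_dict : List (String × List (String × String))) (is_premium : Bool) : List (String × List (List (List (String × String)))) :=
  let keyboard := pvFlush (locations_dict.foldl pvStep ([], none)) ++ pvPremiumRow is_premium
  [("inline_keyboard", keyboard)]

-- ===== PRECONDITION & SPEC =====
def Spec_get_summary_buttons (locations_dict : List (String × List (String × String))) (is_premium : Bool) (out : List (String × List (List (List (String × String))))) : Prop := out = get_summary_buttons_alt locations_dict is_premium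
instance (locations_dict : List (String × List (String × String))) (is_premium : Bool) (out : List (String × List (List (List (String × String))))) : Decidable (Spec_get_summary_buttons locations_dict is_premium out) := by unfold Spec_get_summary_buttons; infer_instance

-- ===== CLAIM (what is proved, stated in full; the proofs are below) =====
def Claim_equal_get_summary_buttons : Prop := ∀ (locations_dict : List (String × List (String × String))) (is_premium : Bool), Dom_get_summary_buttons locations_dict is_premium → Spec_get_summary_buttons locations_dict is_premium (get_summary_buttons locations_dict is_premium)

-- ===== LEMMAS AND PROOFS =====

-- A's chunking pass, abstracted to any list of buttons: rows of 2 by two-step recursion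
def pvChunks2 {β : Type} : List β → List (List β)
  | [] => []
  | [a] => [[a]]
  | a :: b :: t => [a, b] :: pvChunks2 t

-- A's 'for i in range(0, len(row_locs), 2): keyboard.append(row_locs[i:i+2])' IS pvChunks2
theorem pvChunk_core {β : Type} : ∀ (l : List β) (acc : List (List β)),
    (List.range ((l.length + 1) / 2)).foldl
      (fun kb (k : Nat) => kb ++ [PySem.List.slice l (some (2 * (k : Int))) (some (2 * (k : Int) + 2))]) acc
    = acc ++ pvChunks2 l
  | [], acc => by simp [pvChunks2]
  | [a], acc => by
      have h := PySem.List.slice_toNat (xs := [a]) (a := (2 * ((0 : Nat) : Int)))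
        (b := (2 * ((0 : Nat) : Int) + 2)) (by norm_num) (by norm_num)
      norm_num at h ⊢
      simp [pvChunks2, h]
  | a :: b :: t, acc => by
      have hm : ((a :: b :: t).length + 1) / 2 = (t.length + 1) / 2 + 1 := by
        simp [List.length_cons]; omega
      rw [hm, List.range_succ_eq_map, List.foldl_cons, List.foldl_map]
      have hfirst : PySem.List.slice (a :: b :: t) (some (2 * ((0 : Nat) : Int))) (some (2 * ((0 : Nat) : Int) + 2)) = [a, b] := by
        rw [PySem.List.slice_toNat (a :: b :: t) (by norm_num) (by norm_num)]
        norm_num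
        simp
      rw [hfirst]
      have hfun : (fun (kb : List (List β)) (k : Nat) =>
            kb ++ [PySem.List.slice (a :: b :: t) (some (2 * ((k.succ : Nat) : Int))) (some (2 * ((k.succ : Nat) : Int) + 2))])
          = fun kb (k : Nat) => kb ++ [PySem.List.slice t (some (2 * (k : Int))) (some (2 * (k : Int) + 2))] := by
        funext kb k
        rw [PySem.List.slice_toNat (a :: b :: t) (by positivity) (by positivity),
            PySem.List.slice_toNat t (by positivity) (by positivity)]
        have e1 : (2 * ((k.succ : Nat) : Int)).toNat = 2 * k + 2 := by push_cast; omega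
        have e2 : (2 * ((k.succ : Nat) : Int) + 2).toNat = 2 * k + 2 + 2 := by push_cast; omega
        have e3 : (2 * (k : Int)).toNat = 2 * k := by omega
        have e4 : (2 * (k : Int) + 2).toNat = 2 * k + 2 := by omega
        rw [e1, e2, e3, e4]
        have hd : List.drop (2 * k + 2) (a :: b :: t) = List.drop (2 * k) t := by
          rw [show 2 * k + 2 = (2 * k + 1) + 1 by ring, List.drop_succ_cons, List.drop_succ_cons]
        rw [hd, show 2 * k + 2 + 2 - (2 * k + 2) = 2 from by omega,
            show 2 * k + 2 - 2 * k = 2 from by omega]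
      rw [hfun, pvChunk_core t (acc ++ [[a, b]])]
      simp [pvChunks2]

-- pyRange 0 n 2 as a mapped List.range
theorem pvRange_two (n : Int) (hn : 0 ≤ n) :
    PySem.List.pyRange 0 n 2 = (List.range ((n + 1) / 2).toNat).map (fun (k : Nat) => (2 * (k : Int))) := by
  rw [PySem.List.pyRange_of_pos 0 n (by omega)]
  rcases lt_or_ge 0 n with h | h
  · rw [if_pos h, show n - 0 + 2 - 1 = n + 1 from by ring]
    simp
  · have : n = 0 := le_antisymm h hn
    subst this
    simp

-- B's single pass (from any flushed state) also computes pvChunks2 of the buttons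
theorem pvFold_chunks : ∀ (xs : List (String × List (String × String))) (rows : List (List (List (String × String)))),
    pvFlush (xs.foldl pvStep (rows, none)) = rows ++ pvChunks2 (xs.map (fun kv => pvButton kv.1 kv.2))
  | [], rows => by simp [pvFlush, pvChunks2]
  | [kv], rows => by simp [pvStep, pvFlush, pvChunks2]
  | kv1 :: kv2 :: t, rows => by
      simp only [List.foldl_cons, pvStep]
      rw [pvFold_chunks t (rows ++ [[pvButton kv1.1 kv1.2, pvButton kv2.1 kv2.2]])]
      simp [pvChunks2]

-- ===== VERDICT (by name: the statement is the Claim_ definition above) =====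
theorem get_summary_buttons_spec : Claim_equal_get_summary_buttons := by
  intro locs prem _
  unfold Spec_get_summary_buttons get_summary_buttons get_summary_buttons_alt
  simp only [PySem.List.foldl_append_singleton_eq_map, List.nil_append, PySem.List.len_eq]
  rw [pvRange_two _ (by positivity), List.map_map]
  have hnat : ((((locs.map (fun kv => pvButton kv.1 kv.2)).length : Int) + 1) / 2).toNat
      = ((locs.map (fun kv => pvButton kv.1 kv.2)).length + 1) / 2 := by omega
  rw [hnat]
  have hc := pvChunk_core (locs.map (fun kv => pvButton kv.1 kv.2)) []
  rw [PySem.List.foldl_append_singleton_eq_map, List.nil_append] at hc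
  rw [show (fun x => PySem.List.slice (List.map (fun x => pvButton x.1 x.2) locs) (some x) (some (x + 2))) ∘ (fun (k : Nat) => (2 * (k : Int))) = fun (k : Nat) => PySem.List.slice (List.map (fun x => pvButton x.1 x.2) locs) (some (2 * (k : Int))) (some (2 * (k : Int) + 2)) from rfl,
      hc, pvFold_chunks locs []]
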